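-- pv_equiv track=rewrite | github.com/r1cc4rdo/python_projects | marching_tetrahedra/v3/isosurface3.py | surface_from_tetra
-- ===== SOURCE A (Python) =====
-- def surface_from_tetra(cube_indexes, outside):
--     """
--     Returns a list of triangles for the iso-surface at level 'threshold'.
--     Whatever is passed into vertices is interpolated, e.g. coordinates and/or normals.
--     """
--     tetra_faces = [[1, 2, 3], [0, 3, 2], [0, 1, 3], [0, 2, 1]]  # face[k] is missing vertex k
--     outside = [index for index, is_out in enumerate(outside) if is_out]
--     inside = list(set(range(4)) - set(outside))
--
--     if len(outside) in (0, 4):  # nothing to do, the iso-surface does not intersect the tetra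
--         return []
--
--     if len(outside) in (1, 3):  # the iso-surface split vertexes in a 3/1 fashion, output a single triangle
--
--         base_is_out = len(outside) == 3
--         top_index = inside[0] if base_is_out else outside[0]
--         base_indexes = tetra_faces[top_index] if base_is_out else tetra_faces[top_index][::-1]
--         return [(cube_indexes[top_index], cube_indexes[base_index]) for base_index in base_indexes]
--
--     #  if here, count == 2. Split is 2/2, need to output two triangles
--
--     indexes = tetra_faces[outside[0]]
--     while indexes[1] != outside[1]:
--         indexes = indexes[1:] + [indexes[0]]
--     indexes = indexes + [outside[0]]
--
--     quad = [(cube_indexes[sidx], cube_indexes[eidx]) for sidx, eidx in zip(indexes, indexes[1:] + [indexes[0]])]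
--     return [quad[idx] for idx in (0, 2, 1, 0, 3, 2)]  # triangles
-- ===== SOURCE B (Python) =====
-- # Straight 16-entry lookup table indexed by the 4-bit outside mask, replacing
-- # the enumerate/set-difference/rotation branching of the original.
-- CASE_TABLE = [
--     [],
--     [(0, 3), (0, 2), (0, 1)],
--     [(1, 2), (1, 3), (1, 0)],
--     [(3, 1), (2, 0), (1, 2), (3, 1), (0, 3), (2, 0)],
--     [(2, 3), (2, 1), (2, 0)],
--     [(1, 2), (3, 0), (2, 3), (1, 2), (0, 1), (3, 0)],
--     [(3, 2), (0, 1), (2, 0), (3, 2), (1, 3), (0, 1)],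
--     [(3, 0), (3, 2), (3, 1)],
--     [(3, 1), (3, 2), (3, 0)],
--     [(2, 3), (1, 0), (3, 1), (2, 3), (0, 2), (1, 0)],
--     [(0, 3), (2, 1), (3, 2), (0, 3), (1, 0), (2, 1)],
--     [(2, 0), (2, 1), (2, 3)],
--     [(1, 3), (0, 2), (3, 0), (1, 3), (2, 1), (0, 2)],
--     [(1, 0), (1, 3), (1, 2)],
--     [(0, 1), (0, 2), (0, 3)],
--     [],
-- ]
--
--
-- def surface_from_tetra(cube_indexes, outside):
--     mask = sum(1 << i for i, is_out in enumerate(outside) if is_out)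
--     return [(cube_indexes[a], cube_indexes[b]) for a, b in CASE_TABLE[mask]]
-- ===== Notes on version B (the rewrite author's own statement) =====
-- stated objective: idiomatic
-- what changed: Replaces A's enumerate/set-difference branching and rotate-until-aligned while-loop by a precomputed 16-entry case table indexed by the 4-bit outside mask, the standard marching-tetrahedra formulation.
-- outside the precondition, e.g. on surface_from_tetra([0, 0, 0, 0], [True, True, True, False, True]): A returns [], B raises IndexError; on surface_from_tetra([1, 2], [True, False, False, False]): A raises IndexError, B raises IndexError
import Mathlib
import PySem

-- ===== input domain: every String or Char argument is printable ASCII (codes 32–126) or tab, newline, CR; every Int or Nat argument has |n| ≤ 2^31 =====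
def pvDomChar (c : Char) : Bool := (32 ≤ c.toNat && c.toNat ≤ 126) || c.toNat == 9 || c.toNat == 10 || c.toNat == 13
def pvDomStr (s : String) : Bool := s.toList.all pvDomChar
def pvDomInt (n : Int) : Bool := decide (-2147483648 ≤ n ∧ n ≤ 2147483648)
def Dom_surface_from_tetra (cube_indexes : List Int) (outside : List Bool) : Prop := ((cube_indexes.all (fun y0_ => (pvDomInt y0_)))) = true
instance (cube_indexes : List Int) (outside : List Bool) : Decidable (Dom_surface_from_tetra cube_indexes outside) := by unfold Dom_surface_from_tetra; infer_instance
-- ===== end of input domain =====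

-- B replaces A's enumerate/set-difference/rotate-until-aligned branching by a single
-- 16-entry case table indexed by the 4-bit outside mask (idiomatic marching-tetrahedra form);
-- return values agree on Pre_.

-- ===== PORT A =====
-- while indexes[1] != target: indexes = indexes[1:] + [indexes[0]]
-- (ported with fuel 3: on every Pre_ input the target occurs in the 3-element list,
--  so the Python loop stops within at most 2 rotations and the fuel is never exhausted)
def pvRotA : Nat → Int → List Int → List Int
  | 0, _, xs => xs
  | n + 1, t, xs =>
      if PySem.List.pyGetD xs 1 0 ≠ t then
        pvRotA n t (PySem.List.slice xs (some 1) none ++ [PySem.List.pyGetD xs 0 0])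
      else xs

def surface_from_tetra (cube_indexes : List Int) (outside : List Bool) : List (Int × Int) :=
  let tetra_faces : List (List Int) := [[1, 2, 3], [0, 3, 2], [0, 1, 3], [0, 2, 1]]
  -- outside = [index for index, is_out in enumerate(outside) if is_out]
  let outs : List Int := ((PySem.List.enumerate outside 0).filter (fun p => p.2)).map (fun p => p.1)
  -- inside = list(set(range(4)) - set(outside)): CPython iterates this set of small ints
  -- in increasing order, i.e. the kept elements of [0,1,2,3] in order
  let inside : List Int := ([0, 1, 2, 3] : List Int).filter (fun k => !(outs.contains k))
  if outs.length = 0 ∨ outs.length = 4 then []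
  else if outs.length = 1 ∨ outs.length = 3 then
    let base_is_out : Bool := outs.length == 3
    let top_index : Int := if base_is_out then PySem.List.pyGetD inside 0 0 else PySem.List.pyGetD outs 0 0
    let face : List Int := PySem.List.pyGetD tetra_faces top_index []
    -- tetra_faces[top_index][::-1] (PySem.List.slice?_none_none_neg_one: [::-1] is reverse)
    let base_indexes : List Int := if base_is_out then face else face.reverse
    base_indexes.map (fun b => (PySem.List.pyGetD cube_indexes top_index 0, PySem.List.pyGetD cube_indexes b 0))
  else
    let indexes0 : List Int := PySem.List.pyGetD tetra_faces (PySem.List.pyGetD outs 0 0) []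
    let indexes1 : List Int := pvRotA 3 (PySem.List.pyGetD outs 1 0) indexes0
    let indexes : List Int := indexes1 ++ [PySem.List.pyGetD outs 0 0]
    let nxt : List Int := PySem.List.slice indexes (some 1) none ++ [PySem.List.pyGetD indexes 0 0]
    let quad : List (Int × Int) :=
      (indexes.zip nxt).map (fun se => (PySem.List.pyGetD cube_indexes se.1 0, PySem.List.pyGetD cube_indexes se.2 0))
    ([0, 2, 1, 0, 3, 2] : List Int).map (fun idx => PySem.List.pyGetD quad idx (0, 0))

-- ===== PORT B =====
def pvCaseTable : List (List (Int × Int)) :=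
  [ [],
    [(0, 3), (0, 2), (0, 1)],
    [(1, 2), (1, 3), (1, 0)],
    [(3, 1), (2, 0), (1, 2), (3, 1), (0, 3), (2, 0)],
    [(2, 3), (2, 1), (2, 0)],
    [(1, 2), (3, 0), (2, 3), (1, 2), (0, 1), (3, 0)],
    [(3, 2), (0, 1), (2, 0), (3, 2), (1, 3), (0, 1)],
    [(3, 0), (3, 2), (3, 1)],
    [(3, 1), (3, 2), (3, 0)],
    [(2, 3), (1, 0), (3, 1), (2, 3), (0, 2), (1, 0)],
    [(0, 3), (2, 1), (3, 2), (0, 3), (1, 0), (2, 1)],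
    [(2, 0), (2, 1), (2, 3)],
    [(1, 3), (0, 2), (3, 0), (1, 3), (2, 1), (0, 2)],
    [(1, 0), (1, 3), (1, 2)],
    [(0, 1), (0, 2), (0, 3)],
    [] ]

def surface_from_tetra_alt (cube_indexes : List Int) (outside : List Bool) : List (Int × Int) :=
  -- mask = sum(1 << i for i, is_out in enumerate(outside) if is_out)
  let mask : Int :=
    (((PySem.List.enumerate outside 0).filter (fun p => p.2)).map (fun p => (1 : Int) <<< p.1.toNat)).sum
  (PySem.List.pyGetD pvCaseTable mask []).map
    (fun ab => (PySem.List.pyGetD cube_indexes ab.1 0, PySem.List.pyGetD cube_indexes ab.2 0))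

-- ===== PRECONDITION & SPEC =====
-- Pre_ excludes malformed inputs outside the tetra shape: an outside flag set at an index ≥ 4
-- makes A raise IndexError, loop forever, or (only when exactly 4 flags are set) return an
-- accidental []; and fewer than 4 cube indices make A raise IndexError whenever it must index them.
def Pre_surface_from_tetra (cube_indexes : List Int) (outside : List Bool) : Prop :=
  (∀ (i : Nat), (h : i < outside.length) → outside[i] = true → i < 4) ∧
  (outside.count true = 0 ∨ outside.count true = 4 ∨ 4 ≤ cube_indexes.length)
instance (cube_indexes : List Int) (outside : List Bool) : Decidable (Pre_surface_from_tetra cube_indexes outside) := by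
  unfold Pre_surface_from_tetra; infer_instance

def pvWitness_surface_from_tetra : List Int × List Bool := ([5, 6, 7, 8], [true, false, false, false])

def Spec_surface_from_tetra (cube_indexes : List Int) (outside : List Bool) (out : List (Int × Int)) : Prop := out = surface_from_tetra_alt cube_indexes outside
instance (cube_indexes : List Int) (outside : List Bool) (out : List (Int × Int)) : Decidable (Spec_surface_from_tetra cube_indexes outside out) := by unfold Spec_surface_from_tetra; infer_instance

-- ===== CLAIM (what is proved, stated in full; the proofs are below) =====
def Claim_equal_surface_from_tetra : Prop := ∀ (cube_indexes : List Int) (outside : List Bool), Dom_surface_from_tetra cube_indexes outside → Pre_surface_from_tetra cube_indexes outside → Spec_surface_from_tetra cube_indexes outside (surface_from_tetra cube_indexes outside)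

-- ===== LEMMAS AND PROOFS =====

lemma pv_filter_enumerate_false (r : List Bool) (hr : ∀ b ∈ r, b = false) (s : Int) :
    (PySem.List.enumerate r s).filter (fun p => p.2) = [] := by
  induction r generalizing s with
  | nil => simp [PySem.List.enumerate_nil]
  | cons b r ih =>
      have hb : b = false := hr b (List.mem_cons_self ..)
      simp [PySem.List.enumerate_cons, hb, (fun s => ih (fun x hx => hr x (List.mem_cons_of_mem _ hx)) s) (s+1)]

lemma pv_A_append_false (ci : List Int) (p r : List Bool) (hr : ∀ b ∈ r, b = false) :
    surface_from_tetra ci (p ++ r) = surface_from_tetra ci p := by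
  simp only [surface_from_tetra, PySem.List.enumerate_append, List.filter_append,
        pv_filter_enumerate_false r hr, List.append_nil]

lemma pv_B_append_false (ci : List Int) (p r : List Bool) (hr : ∀ b ∈ r, b = false) :
    surface_from_tetra_alt ci (p ++ r) = surface_from_tetra_alt ci p := by
  simp only [surface_from_tetra_alt, PySem.List.enumerate_append, List.filter_append,
        pv_filter_enumerate_false r hr, List.append_nil]

lemma pv_key (ci : List Int) (p : List Bool) (hlen : p.length ≤ 4) :
    surface_from_tetra ci p = surface_from_tetra_alt ci p := by
  rcases p with _ | ⟨a, _ | ⟨b, _ | ⟨c, _ | ⟨d, rest⟩⟩⟩⟩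
  · rfl
  · cases a <;> rfl
  · cases a <;> cases b <;> rfl
  · cases a <;> cases b <;> cases c <;> rfl
  · have hrest : rest = [] := by
      rcases rest with _ | ⟨x, xs⟩
      · rfl
      · simp at hlen; omega
    subst hrest
    cases a <;> cases b <;> cases c <;> cases d <;> rfl

-- ===== VERDICT (by name: the statement is the Claim_ definition above) =====
theorem surface_from_tetra_spec : Claim_equal_surface_from_tetra := by
  intro ci os _ hpre
  obtain ⟨h4, -⟩ := hpre
  have hr : ∀ b ∈ os.drop 4, b = false := by
    intro b hb
    obtain ⟨k, hk', hbk⟩ := List.mem_iff_getElem.mp hb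
    rw [List.getElem_drop] at hbk
    rw [List.length_drop] at hk'
    cases hB : b with
    | false => rfl
    | true =>
        subst hB
        have := h4 (4 + k) (by omega) hbk
        omega
  have key := pv_key ci (os.take 4) (by simp)
  unfold Spec_surface_from_tetra
  calc surface_from_tetra ci os
      = surface_from_tetra ci (os.take 4 ++ os.drop 4) := by rw [List.take_append_drop]
    _ = surface_from_tetra ci (os.take 4) := pv_A_append_false ci _ _ hr
    _ = surface_from_tetra_alt ci (os.take 4) := key
    _ = surface_from_tetra_alt ci (os.take 4 ++ os.drop 4) := (pv_B_append_false ci _ _ hr).symm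
    _ = surface_from_tetra_alt ci os := by rw [List.take_append_drop]
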